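-- pv_equiv track=rewrite | github.com/h4ckyou/write-ups | Practice/Dreamhack/Rev/Dungeon/solve.py | generate_spell
-- ===== SOURCE A (Python) =====
-- def generate_spell(target):
--     spell = []
--     v7 = target
--
--     while v7 > 0:
--         if v7 % 2 == 0:
--             r = v7 // 2
--             spell.append("B")
--         else:
--             r = v7 - 1
--             spell.append("A")
--
--         v7 = r
--
--     return ''.join(spell[::-1])
-- ===== SOURCE B (Python) =====
-- def generate_spell(target):
--     if target <= 0:
--         return ''
--     bits = bin(target)[2:]
--     out = ['A']
--     for b in bits[1:]:
--         out.append('B')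
--         if b == '1':
--             out.append('A')
--     return ''.join(out)
-- ===== Notes on version B (the rewrite author's own statement) =====
-- stated objective: alternative
-- what changed: B replaces A's backwards halve/decrement loop with a forward pass over the binary digit string (bin(target)[2:]): emit 'A' for the leading bit, then 'B' per remaining bit plus 'A' for each set bit, with no reversal.
import Mathlib
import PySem

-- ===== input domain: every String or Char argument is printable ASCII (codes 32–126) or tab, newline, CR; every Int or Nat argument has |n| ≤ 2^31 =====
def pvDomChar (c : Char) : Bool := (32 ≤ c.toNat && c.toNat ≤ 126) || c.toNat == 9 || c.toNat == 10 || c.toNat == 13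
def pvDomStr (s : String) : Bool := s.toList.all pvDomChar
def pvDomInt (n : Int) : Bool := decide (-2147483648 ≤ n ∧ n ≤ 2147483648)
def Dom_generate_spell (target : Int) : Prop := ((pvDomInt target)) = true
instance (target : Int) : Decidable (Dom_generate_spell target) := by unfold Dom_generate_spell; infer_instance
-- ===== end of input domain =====

-- B rebuilds the spell left-to-right from target's binary digits instead of A's
-- backwards halve/decrement loop with a final reversal (objective: alternative).

-- ===== PORT A =====
-- the while-loop, accumulating 'spell'; terminates because v7's toNat strictly decreases
def pvLoopA (v : Int) (spell : List Char) : List Char :=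
  if h : v > 0 then
    if PySem.Int.mod v 2 == 0 then
      pvLoopA (PySem.Int.floordiv v 2) (spell ++ ['B'])
    else
      pvLoopA (v - 1) (spell ++ ['A'])
  else spell
termination_by v.toNat
decreasing_by
  · rw [PySem.Int.floordiv_eq_ediv_of_pos (by omega)]; omega
  · omega

def generate_spell (target : Int) : String :=
  -- ''.join(spell[::-1])
  String.mk ((pvLoopA target []).reverse)

-- ===== PORT B =====
-- bin(n)[2:] as a list of digit chars, most significant first (n > 0 in use)
def pvBits (n : Nat) : List Char :=
  if n = 0 then [] else pvBits (n / 2) ++ [if n % 2 == 1 then '1' else '0']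
termination_by n
decreasing_by omega

def generate_spell_alt (target : Int) : String :=
  if target ≤ 0 then "" else
    match pvBits target.toNat with
    | [] => ""      -- unreachable: target > 0
    | _ :: rest =>  -- leading '1' → out = ['A'], then the loop over bits[1:]
      String.mk (rest.foldl
        (fun acc b => (acc ++ ['B']) ++ (if b == '1' then ['A'] else [])) ['A'])

-- ===== PRECONDITION & SPEC =====
def Spec_generate_spell (target : Int) (out : String) : Prop := out = generate_spell_alt target
instance (target : Int) (out : String) : Decidable (Spec_generate_spell target out) := by unfold Spec_generate_spell; infer_instance

-- ===== CLAIM (what is proved, stated in full; the proofs are below) =====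
def Claim_equal_generate_spell : Prop := ∀ (target : Int), Dom_generate_spell target → Spec_generate_spell target (generate_spell target)

-- ===== LEMMAS AND PROOFS =====

-- the spell B derives from a positive n's bits (proof-side characterisation of B)
def pvSpellB (n : Nat) : List Char :=
  match pvBits n with
  | [] => []
  | _ :: rest => 'A' :: rest.flatMap (fun b => 'B' :: (if b == '1' then ['A'] else []))

theorem pvLoopA_acc_aux : ∀ (n : Nat) (v : Int), v.toNat = n →
    ∀ spell, pvLoopA v spell = spell ++ pvLoopA v [] := by
  intro n
  induction n using Nat.strong_induction_on with
  | _ n ih =>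
    intro v hv spell
    rw [pvLoopA]
    conv_rhs => rw [pvLoopA]
    by_cases h : v > 0
    · rw [dif_pos h, dif_pos h]
      by_cases he : (PySem.Int.mod v 2 == 0) = true
      · rw [if_pos he, if_pos he]
        simp only [List.nil_append]
        have hlt : (PySem.Int.floordiv v 2).toNat < n := by
          rw [PySem.Int.floordiv_eq_ediv_of_pos (by omega)]; omega
        rw [ih _ hlt _ rfl (spell ++ ['B']), ih _ hlt _ rfl ['B']]
        simp
      · rw [if_neg he, if_neg he]
        simp only [List.nil_append]
        have hlt : (v - 1).toNat < n := by omega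
        rw [ih _ hlt _ rfl (spell ++ ['A']), ih _ hlt _ rfl ['A']]
        simp
    · rw [dif_neg h, dif_neg h]
      simp

theorem pvLoopA_acc (v : Int) (spell : List Char) :
    pvLoopA v spell = spell ++ pvLoopA v [] :=
  pvLoopA_acc_aux v.toNat v rfl spell

theorem pvBits_ne_nil (n : Nat) (hn : 0 < n) : pvBits n ≠ [] := by
  rw [pvBits]
  simp [Nat.pos_iff_ne_zero.mp hn]

-- appending one more bit d to the bit string appends F d to B's spell
theorem pvSpellB_snoc (n : Nat) (hn : 0 < n) (d : Char) (m : Nat)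
    (hm : pvBits m = pvBits n ++ [d]) :
    pvSpellB m = pvSpellB n ++ ('B' :: (if d == '1' then ['A'] else [])) := by
  unfold pvSpellB
  rw [hm]
  obtain ⟨c, rest, hcr⟩ : ∃ c rest, pvBits n = c :: rest := by
    cases h : pvBits n with
    | nil => exact absurd h (pvBits_ne_nil n hn)
    | cons c rest => exact ⟨c, rest, rfl⟩
  rw [hcr]
  simp

theorem pvBits_even (n : Nat) (hn : 0 < n) :
    pvBits (2 * n) = pvBits n ++ ['0'] := by
  rw [pvBits]
  have h1 : ¬ (2 * n = 0) := by omega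
  have h2 : 2 * n / 2 = n := by omega
  have h3 : 2 * n % 2 = 0 := by omega
  simp [h1, h2, h3]

theorem pvBits_odd (n : Nat) (hn : 0 < n) :
    pvBits (2 * n + 1) = pvBits n ++ ['1'] := by
  rw [pvBits]
  have h2 : (2 * n + 1) / 2 = n := by omega
  have h3 : (2 * n + 1) % 2 = 1 := by omega
  simp [h2, h3]

theorem pvFoldlB (l : List Char) (acc : List Char) :
    l.foldl (fun acc b => (acc ++ ['B']) ++ (if b == '1' then ['A'] else [])) acc
      = acc ++ l.flatMap (fun b => 'B' :: (if b == '1' then ['A'] else [])) := by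
  induction l generalizing acc with
  | nil => simp
  | cons x xs ih => rw [List.foldl_cons, ih]; simp [List.flatMap_cons]

theorem pvMain (n : Nat) (hn : 0 < n) :
    (pvLoopA (n : Int) []).reverse = pvSpellB n := by
  induction n using Nat.strong_induction_on with
  | _ n ih =>
    rcases Nat.lt_or_ge n 2 with h2 | h2
    · -- n = 1
      have hn1 : n = 1 := by omega
      subst hn1
      simp only [Nat.cast_one]
      have h1 : pvLoopA (1 : Int) [] = ['A'] := by
        rw [pvLoopA, dif_pos (by norm_num), if_neg (by decide)]
        norm_num
        rw [pvLoopA]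
        norm_num
      rw [h1]
      simp [pvSpellB, pvBits]
    · rcases Nat.even_or_odd n with ⟨m, hm⟩ | ⟨m, hm⟩
      · -- even: one 'B' step to m = n / 2
        have hm0 : 0 < m := by omega
        have hn2 : n = 2 * m := by omega
        have hmod : PySem.Int.mod (n : Int) 2 = 0 := by
          rw [PySem.Int.mod_eq_emod_of_pos (by norm_num)]; omega
        have hdiv : PySem.Int.floordiv (n : Int) 2 = (m : Int) := by
          rw [PySem.Int.floordiv_eq_ediv_of_pos (by norm_num)]; omega
        rw [pvLoopA, dif_pos (by exact_mod_cast hn), if_pos (by rw [hmod]; rfl),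
          hdiv, pvLoopA_acc, List.reverse_append]
        rw [ih m (by omega) hm0]
        rw [pvSpellB_snoc m hm0 '0' n (by rw [hn2]; exact pvBits_even m hm0)]
        simp
      · -- odd: an 'A' step to n - 1, then a 'B' step to m = (n - 1) / 2
        have hm0 : 0 < m := by omega
        have hmod : PySem.Int.mod (n : Int) 2 = 1 := by
          rw [PySem.Int.mod_eq_emod_of_pos (by norm_num)]; omega
        rw [pvLoopA, dif_pos (by exact_mod_cast hn), if_neg (by rw [hmod]; simp)]
        have hsub : (n : Int) - 1 = ((2 * m : Nat) : Int) := by push_cast; omega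
        rw [hsub]
        have hmod2 : PySem.Int.mod ((2 * m : Nat) : Int) 2 = 0 := by
          rw [PySem.Int.mod_eq_emod_of_pos (by norm_num)]; push_cast; omega
        have hdiv2 : PySem.Int.floordiv ((2 * m : Nat) : Int) 2 = (m : Int) := by
          rw [PySem.Int.floordiv_eq_ediv_of_pos (by norm_num)]; push_cast; omega
        rw [pvLoopA, dif_pos (by push_cast; exact_mod_cast (by omega : (0:Int) < 2 * m)),
          if_pos (by rw [hmod2]; rfl), hdiv2, pvLoopA_acc]
        simp only [List.nil_append, List.reverse_append, List.reverse_cons,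
          List.reverse_nil, List.nil_append]
        rw [ih m (by omega) hm0]
        rw [pvSpellB_snoc m hm0 '1' n
          (by rw [show n = 2 * m + 1 by omega]; exact pvBits_odd m hm0)]
        simp

-- ===== VERDICT (by name: the statement is the Claim_ definition above) =====
theorem generate_spell_spec : Claim_equal_generate_spell := by
  intro target _
  unfold Spec_generate_spell generate_spell generate_spell_alt
  rcases Classical.em (target ≤ 0) with h | h
  · rw [pvLoopA]
    simp only [not_lt.mpr h, dite_false, List.reverse_nil, if_pos h]
    rfl
  · have h : 0 < target := by omega
    have hne : ¬ target ≤ 0 := by omega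
    simp only [hne, ite_false]
    have hn : 0 < target.toNat := by omega
    have hcast : ((target.toNat : Nat) : Int) = target := by omega
    have hmain := pvMain target.toNat hn
    rw [hcast] at hmain
    rw [hmain]
    unfold pvSpellB
    cases hb : pvBits target.toNat with
    | nil => exact absurd hb (pvBits_ne_nil _ hn)
    | cons c rest =>
      dsimp only
      rw [pvFoldlB]
      simp [List.flatMap]
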